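-- pv_equiv track=rewrite | github.com/andrewgait/advent_of_code | adventofcode2017/advent4/advent4.py | part2
-- ===== SOURCE A (Python) =====
-- def part2(input):
--     count_valid = 0
--     count_line = 0
--
--     # read string into array
--     for line in input:
--         string_array = []
--         length = len(line)
--         current_start = 0
--         for i in range(length):
--             if ((line[i]==" ") or (line[i]=="\n")):
--                 string_array.append(line[current_start:i])
--                 current_start = i+1
--
--         # Now check in string_array for anagrams
--         sarr_size = len(string_array)
--         invalid = False
--         for i in range(sarr_size):
--             for j in range(i+1, sarr_size):
--                 if (sorted(string_array[i]) == sorted(string_array[j])):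
--                     invalid = True
--                     break
--
--         count_line += 1
--         if not invalid:
--             count_valid += 1
--
--     return count_valid, count_line
-- ===== SOURCE B (Python) =====
-- def part2(input):
--     count_valid = 0
--     for line in input:
--         words, cur = [], []
--         for ch in line:
--             if ch == ' ' or ch == '\n':
--                 words.append(''.join(cur))
--                 cur = []
--             else:
--                 cur.append(ch)
--         sigs = [tuple(sorted(w)) for w in words]
--         if len(sigs) == len(set(sigs)):
--             count_valid += 1
--     return count_valid, len(input)
-- ===== Notes on version B (the rewrite author's own statement) =====
-- stated objective: alternative
-- what changed: The anagram check is replaced by a duplicate-signature test (set of sorted-character tuples per line) instead of A's nested pairwise scan, the parser keeps a current-word buffer instead of index slicing, and the line count is len(input) instead of a running accumulator.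
import Mathlib
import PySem

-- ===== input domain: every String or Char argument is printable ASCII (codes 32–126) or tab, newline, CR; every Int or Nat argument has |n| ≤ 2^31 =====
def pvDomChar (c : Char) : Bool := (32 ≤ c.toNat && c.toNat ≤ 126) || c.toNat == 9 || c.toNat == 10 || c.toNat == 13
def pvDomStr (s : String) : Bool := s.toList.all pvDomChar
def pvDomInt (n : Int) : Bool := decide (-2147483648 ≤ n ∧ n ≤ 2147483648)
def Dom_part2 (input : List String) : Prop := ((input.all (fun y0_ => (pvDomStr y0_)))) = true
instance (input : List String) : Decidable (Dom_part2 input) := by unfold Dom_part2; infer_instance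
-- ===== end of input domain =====

-- B replaces A's quadratic pairwise anagram scan with a duplicate test on the list of sorted-character
-- signatures (via set size), parses with a current-word buffer instead of index slicing, and returns
-- len(input) instead of a running line counter.

-- ===== PORT A =====
-- the inner `for i ... line[i]` loop: state = (string_array, current_start)
def part2_lineArr (line : String) : List String × Int :=
  (PySem.List.pyRange 0 (PySem.Str.len line)).foldl
    (fun p i =>
      if PySem.Str.pyGet? line i = some ' ' ∨ PySem.Str.pyGet? line i = some '\n' then
        (p.1 ++ [PySem.Str.slice line (some p.2) (some i)], i + 1)
      else p)
    ([], 0)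

-- the nested `for i / for j` anagram scan; the `break` only stops scanning after invalid is already
-- true, and the body keeps a true flag true, so dropping it leaves the value unchanged
def part2_invalid (string_array : List String) : Bool :=
  (PySem.List.pyRange 0 (string_array.length : Int)).foldl
    (fun inv i =>
      (PySem.List.pyRange (i + 1) (string_array.length : Int)).foldl
        (fun inv2 j =>
          if PySem.List.sorted (PySem.List.pyGetD string_array i "").toList (fun c => c)
             = PySem.List.sorted (PySem.List.pyGetD string_array j "").toList (fun c => c)
          then true else inv2)
        inv)
    false

-- one iteration of A's outer loop over (count_valid, count_line)
def part2_lineStep (st : Int × Int) (line : String) : Int × Int :=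
  (st.1 + (if part2_invalid (part2_lineArr line).1 then 0 else 1), st.2 + 1)

def part2 (input : List String) : Int × Int :=
  input.foldl part2_lineStep (0, 0)

-- ===== PORT B =====
-- `for ch in line`: state = (words, cur)
def part2_altWords (line : String) : List String × List Char :=
  line.toList.foldl
    (fun p ch =>
      if ch = ' ' ∨ ch = '\n' then (p.1 ++ [String.ofList p.2], [])
      else (p.1, p.2 ++ [ch]))
    ([], [])

-- sigs = [tuple(sorted(w)) for w in words]
def part2_altSigs (words : List String) : List (List Char) :=
  words.map (fun w => PySem.List.sorted w.toList (fun c => c))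

-- one line of B: bump the count iff the signature list has no duplicate
def part2_altLine (acc : Int) (line : String) : Int :=
  if ((part2_altSigs (part2_altWords line).1).length : Int)
     = PySem.Set.len (PySem.Set.ofList (part2_altSigs (part2_altWords line).1))
  then acc + 1 else acc

def part2_alt (input : List String) : Int × Int :=
  (input.foldl part2_altLine 0, (input.length : Int))

-- ===== PRECONDITION & SPEC =====
def Spec_part2 (input : List String) (out : Int × Int) : Prop := out = part2_alt input
instance (input : List String) (out : Int × Int) : Decidable (Spec_part2 input out) := by unfold Spec_part2; infer_instance

-- ===== CLAIM (what is proved, stated in full; the proofs are below) =====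
def Claim_equal_part2 : Prop := ∀ (input : List String), Dom_part2 input → Spec_part2 input (part2 input)

-- ===== LEMMAS AND PROOFS =====

-- reference splitter: the word list both parsers produce, as lists of characters
def pvScan : List Char → List (List Char) → List Char → List (List Char)
  | [], acc, _ => acc
  | ch :: rest, acc, cur =>
    if ch = ' ' ∨ ch = '\n' then pvScan rest (acc ++ [cur]) []
    else pvScan rest acc (cur ++ [ch])

theorem pvScan_altWords :
    ∀ (rem : List Char) (acc : List String) (cur : List Char),
      ((rem.foldl
        (fun p ch =>
          if ch = ' ' ∨ ch = '\n' then (p.1 ++ [String.ofList p.2], [])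
          else (p.1, p.2 ++ [ch]))
        (acc, cur)).1).map String.toList = pvScan rem (acc.map String.toList) cur := by
  intro rem
  induction rem with
  | nil => intro acc cur; simp [pvScan]
  | cons ch rest ih =>
      intro acc cur
      by_cases h : ch = ' ' ∨ ch = '\n'
      · simp only [List.foldl_cons, if_pos h, pvScan, ih]
        simp
      · simp only [List.foldl_cons, if_neg h, pvScan, ih]

theorem altWords_eq_scan (line : String) :
    ((part2_altWords line).1).map String.toList = pvScan line.toList [] [] := by
  simpa using pvScan_altWords line.toList [] []

theorem lineArr_eq_scan_aux (line : String) :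
    ∀ (m k c : ℕ) (arr : List String),
      m = line.toList.length - k → c ≤ k → k ≤ line.toList.length →
      (((PySem.List.pyRange (k : Int) ((line.toList.length : ℕ) : Int)).foldl
        (fun p i =>
          if PySem.Str.pyGet? line i = some ' ' ∨ PySem.Str.pyGet? line i = some '\n' then
            (p.1 ++ [PySem.Str.slice line (some p.2) (some i)], i + 1)
          else p)
        (arr, (c : Int))).1).map String.toList
      = pvScan (line.toList.drop k) (arr.map String.toList) ((line.toList.drop c).take (k - c)) := by
  intro m
  induction m with
  | zero =>
      intro k c arr hm hck hkn
      have hk : k = line.toList.length := by omega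
      subst hk
      rw [PySem.List.pyRange_one_eq_nil (by omega)]
      simp only [List.foldl_nil, List.drop_length]
      rfl
  | succ m ih =>
      intro k c arr hm hck hkn
      have hklt : k < line.toList.length := by omega
      rw [PySem.List.pyRange_one_cons (by exact_mod_cast hklt)]
      simp only [List.foldl_cons]
      have hget : PySem.Str.pyGet? line (k : Int) = some line.toList[k] := by
        rw [PySem.Str.pyGet?_natCast]
        exact List.getElem?_eq_getElem hklt
      have hdrop : line.toList.drop k = line.toList[k] :: line.toList.drop (k + 1) :=
        List.drop_eq_getElem_cons hklt
      have hcast : ((k : Int) + 1) = ((k + 1 : ℕ) : Int) := by push_cast; ring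
      by_cases h : line.toList[k] = ' ' ∨ line.toList[k] = '\n'
      · rw [if_pos (by rw [hget]; rcases h with h | h <;> [left; right] <;> rw [h])]
        have := ih (k + 1) (k + 1) (arr ++ [PySem.Str.slice line (some (c : Int)) (some (k : Int))])
          (by omega) (by omega) (by omega)
        rw [hcast, this, hdrop]
        have hslice : (PySem.Str.slice line (some (c : Int)) (some (k : Int))).toList
            = (line.toList.drop c).take (k - c) := by
          rw [PySem.Str.toList_slice, PySem.Chars.slice_eq_listSlice, PySem.List.slice_natCast]
        simp [pvScan, h, hslice]
      · rw [if_neg (by rw [hget]; simpa using h)]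
        have := ih (k + 1) c arr (by omega) (by omega) (by omega)
        rw [hcast, this, hdrop]
        have htake : (line.toList.drop c).take (k + 1 - c)
            = (line.toList.drop c).take (k - c) ++ [line.toList[k]] := by
          have h1 : k + 1 - c = (k - c) + 1 := by omega
          have h2 : (line.toList.drop c)[k - c]? = some line.toList[k] := by
            rw [List.getElem?_drop]
            have : c + (k - c) = k := by omega
            rw [this]
            exact List.getElem?_eq_getElem hklt
          rw [h1, List.take_add_one, h2]
          rfl
        rw [htake]
        simp [pvScan, h]

theorem lineArr_eq_scan (line : String) :
    ((part2_lineArr line).1).map String.toList = pvScan line.toList [] [] := by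
  have := lineArr_eq_scan_aux line line.toList.length 0 0 [] (by omega) (by omega) (by omega)
  simpa [part2_lineArr, PySem.Str.len_eq] using this

-- generic fold shapes for the nested anagram scan
theorem foldl_if_stays_true {α : Type} (p : α → Prop) [DecidablePred p] :
    ∀ (l : List α), l.foldl (fun acc x => if p x then true else acc) true = true := by
  intro l
  induction l with
  | nil => rfl
  | cons x xs ih => simpa using ih

theorem foldl_if_true {α : Type} (p : α → Prop) [DecidablePred p] :
    ∀ (l : List α) (b : Bool),
      l.foldl (fun acc x => if p x then true else acc) b = (b || l.any fun x => decide (p x)) := by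
  intro l
  induction l with
  | nil => intro b; simp
  | cons x xs ih =>
      intro b
      simp only [List.foldl_cons, List.any_cons]
      by_cases h : p x
      · rw [if_pos h, foldl_if_stays_true]
        simp [h]
      · rw [if_neg h, ih]
        simp [h]

theorem foldl_or {α : Type} (q : α → Bool) :
    ∀ (l : List α) (b : Bool), l.foldl (fun acc x => acc || q x) b = (b || l.any q) := by
  intro l
  induction l with
  | nil => intro b; simp
  | cons x xs ih => intro b; simp [ih, Bool.or_assoc]

theorem invalid_iff (arr : List String) :
    part2_invalid arr = true ↔ ¬ (part2_altSigs arr).Nodup := by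
  have hstep : part2_invalid arr
      = (PySem.List.pyRange 0 (arr.length : Int)).any (fun i =>
          (PySem.List.pyRange (i + 1) (arr.length : Int)).any (fun j =>
            decide (PySem.List.sorted (PySem.List.pyGetD arr i "").toList (fun c => c)
              = PySem.List.sorted (PySem.List.pyGetD arr j "").toList (fun c => c)))) := by
    unfold part2_invalid
    have h1 : (fun (inv : Bool) (i : Int) =>
        (PySem.List.pyRange (i + 1) (arr.length : Int)).foldl
          (fun inv2 j =>
            if PySem.List.sorted (PySem.List.pyGetD arr i "").toList (fun c => c)
               = PySem.List.sorted (PySem.List.pyGetD arr j "").toList (fun c => c)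
            then true else inv2)
          inv)
        = (fun (inv : Bool) (i : Int) => inv ||
            (PySem.List.pyRange (i + 1) (arr.length : Int)).any (fun j =>
              decide (PySem.List.sorted (PySem.List.pyGetD arr i "").toList (fun c => c)
                = PySem.List.sorted (PySem.List.pyGetD arr j "").toList (fun c => c)))) := by
      funext inv i
      exact foldl_if_true _ _ inv
    rw [h1, foldl_or]
    simp
  rw [hstep]
  constructor
  · intro h hnd
    rw [List.any_eq_true] at h
    obtain ⟨i, hi, h⟩ := h
    rw [List.any_eq_true] at h
    obtain ⟨j, hj, h⟩ := h
    rw [PySem.List.mem_pyRange_one] at hi hj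
    rw [decide_eq_true_iff] at h
    have hi0 : 0 ≤ i := hi.1
    have hij : i < j := by omega
    have hjn : j < (arr.length : Int) := hj.2
    have hiN : i.toNat < arr.length := by omega
    have hjN : j.toNat < arr.length := by omega
    rw [PySem.List.pyGetD_eq_getElem arr "" hi0 hi.2,
        PySem.List.pyGetD_eq_getElem arr "" (by omega) hjn] at h
    have hpw := (List.pairwise_iff_getElem).mp hnd i.toNat j.toNat
      (by simpa [part2_altSigs] using hiN) (by simpa [part2_altSigs] using hjN) (by omega)
    apply hpw
    simpa [part2_altSigs] using h
  · intro hnd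
    have : ¬ ∀ (i j : ℕ) (_hi : i < (part2_altSigs arr).length)
        (_hj : j < (part2_altSigs arr).length), i < j →
        (part2_altSigs arr)[i] ≠ (part2_altSigs arr)[j] := by
      intro hall
      exact hnd ((List.pairwise_iff_getElem).mpr hall)
    push_neg at this
    obtain ⟨i, j, hi, hj, hij, heq⟩ := this
    have hlen : (part2_altSigs arr).length = arr.length := by simp [part2_altSigs]
    rw [List.any_eq_true]
    refine ⟨(i : Int), by rw [PySem.List.mem_pyRange_one]; omega, ?_⟩
    rw [List.any_eq_true]
    refine ⟨(j : Int), by rw [PySem.List.mem_pyRange_one]; omega, ?_⟩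
    rw [decide_eq_true_iff]
    rw [PySem.List.pyGetD_eq_getElem arr "" (by omega) (by omega),
        PySem.List.pyGetD_eq_getElem arr "" (by omega) (by omega)]
    simp only [Int.toNat_natCast]
    simpa [part2_altSigs] using heq

theorem setlen_iff (sigs : List (List Char)) :
    ((sigs.length : Int) = PySem.Set.len (PySem.Set.ofList sigs)) ↔ sigs.Nodup := by
  have hmem : ∀ x, x ∈ (PySem.Set.ofList sigs : List (List Char)) ↔ x ∈ sigs :=
    fun x => PySem.Set.mem_ofList sigs x
  have hfin : (PySem.Set.ofList sigs : List (List Char)).toFinset = sigs.toFinset := by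
    ext x; simp [hmem]
  have hlen : (PySem.Set.ofList sigs : List (List Char)).length = sigs.toFinset.card := by
    rw [← hfin]
    exact (List.toFinset_card_of_nodup (PySem.Set.nodup_ofList sigs)).symm
  have hset : PySem.Set.len (PySem.Set.ofList sigs) = (sigs.toFinset.card : Int) := by
    simp [PySem.Set.len, hlen]
  rw [hset]
  constructor
  · intro h
    have hcard : sigs.toFinset.card = sigs.length := by exact_mod_cast h.symm
    rw [List.card_toFinset] at hcard
    have hsub : sigs.dedup.Sublist sigs := List.dedup_sublist sigs
    have : sigs.dedup = sigs := hsub.eq_of_length hcard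
    rw [← this]
    exact List.nodup_dedup sigs
  · intro h
    rw [List.toFinset_card_of_nodup h]

-- per-line agreement of the two loop bodies
theorem altLine_shift (a : Int) (line : String) : part2_altLine a line = a + part2_altLine 0 line := by
  unfold part2_altLine
  split <;> ring

theorem line_step_eq (a b : Int) (line : String) :
    part2_lineStep (a, b) line = (a + part2_altLine 0 line, b + 1) := by
  have hsigs : part2_altSigs (part2_altWords line).1 = part2_altSigs (part2_lineArr line).1 := by
    have key : ∀ arr : List String,
        part2_altSigs arr = (arr.map String.toList).map (fun l => PySem.List.sorted l (fun c => c)) := by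
      intro arr
      simp [part2_altSigs, List.map_map, Function.comp]
    rw [key, key, altWords_eq_scan, lineArr_eq_scan]
  unfold part2_lineStep part2_altLine
  rw [hsigs]
  by_cases hnd : (part2_altSigs (part2_lineArr line).1).Nodup
  · rw [if_neg (fun h => (invalid_iff _).mp h hnd), if_pos ((setlen_iff _).mpr hnd)]
    norm_num
  · rw [if_pos ((invalid_iff _).mpr hnd), if_neg (fun h => hnd ((setlen_iff _).mp h))]

theorem foldl_alt_shift (t : List String) :
    ∀ (a : Int), t.foldl part2_altLine a = a + t.foldl part2_altLine 0 := by
  induction t with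
  | nil => intro a; simp
  | cons l t ih =>
      intro a
      simp only [List.foldl_cons]
      rw [ih, ih (part2_altLine 0 l), altLine_shift]
      ring

theorem part2_foldl_eq (input : List String) :
    ∀ (a b : Int),
      input.foldl part2_lineStep (a, b)
      = (a + input.foldl part2_altLine 0, b + (input.length : Int)) := by
  induction input with
  | nil => intro a b; simp
  | cons l t ih =>
      intro a b
      simp only [List.foldl_cons]
      rw [line_step_eq, ih, foldl_alt_shift, foldl_alt_shift t (part2_altLine 0 l)]
      simp only [Prod.mk.injEq, List.length_cons]
      push_cast
      constructor <;> ring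

-- ===== VERDICT (by name: the statement is the Claim_ definition above) =====
theorem part2_spec : Claim_equal_part2 := by
  intro input _hdom
  show part2 input = part2_alt input
  unfold part2 part2_alt
  simpa using part2_foldl_eq input 0 0
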